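-- pv_equiv track=rewrite | github.com/raymondstfx/EvolutinaryComputation | GP/task.py | dfs
-- ===== SOURCE A (Python) =====
-- def is_valid_state(state):
--     # Check constraints: farmer cannot leave goat with wolf or cabbage with goat
--     farmer, goat, wolf, cabbage = state
--     if farmer != goat and (goat == wolf or goat == cabbage):
--         return False
--     return True
--
-- def get_next_states(state):
--     farmer, goat, wolf, cabbage = state
--     next_states = []
--     # Farmer moves alone
--     next_states.append(('w' if farmer == 'e' else 'e', goat, wolf, cabbage))
--     # Farmer moves with goat
--     if farmer == goat:
--         next_states.append(('w' if farmer == 'e' else 'e', 'w' if goat == 'e' else 'e', wolf, cabbage))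
--     # Farmer moves with wolf
--     if farmer == wolf:
--         next_states.append(('w' if farmer == 'e' else 'e', goat, 'w' if wolf == 'e' else 'e', cabbage))
--     # Farmer moves with cabbage
--     if farmer == cabbage:
--         next_states.append(('w' if farmer == 'e' else 'e', goat, wolf, 'w' if cabbage == 'e' else 'e'))
--
--     # Filter valid states
--     return [s for s in next_states if is_valid_state(s)]
--
-- def dfs(state, goal_state, visited, path):
--     if state == goal_state:
--         return [path]
--
--     visited.add(state)
--     solutions = []
--     for next_state in get_next_states(state):
--         if next_state not in visited:
--             solutions.extend(dfs(next_state, goal_state, visited, path + [next_state]))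
--     visited.remove(state)
--
--     return solutions
-- ===== SOURCE B (Python) =====
-- def is_valid_state(state):
--     # Check constraints: farmer cannot leave goat with wolf or cabbage with goat
--     farmer, goat, wolf, cabbage = state
--     if farmer != goat and (goat == wolf or goat == cabbage):
--         return False
--     return True
--
-- def get_next_states(state):
--     farmer, goat, wolf, cabbage = state
--     next_states = []
--     next_states.append(('w' if farmer == 'e' else 'e', goat, wolf, cabbage))
--     if farmer == goat:
--         next_states.append(('w' if farmer == 'e' else 'e', 'w' if goat == 'e' else 'e', wolf, cabbage))
--     if farmer == wolf:
--         next_states.append(('w' if farmer == 'e' else 'e', goat, 'w' if wolf == 'e' else 'e', cabbage))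
--     if farmer == cabbage:
--         next_states.append(('w' if farmer == 'e' else 'e', goat, wolf, 'w' if cabbage == 'e' else 'e'))
--     return [s for s in next_states if is_valid_state(s)]
--
-- def dfs(state, goal_state, visited, path):
--     # Iterative explicit-stack DFS; same visited add-on-push/discard-on-pop
--     # mutations and same preorder of solutions as the recursive original.
--     if state == goal_state:
--         return [path]
--     solutions = []
--     visited.add(state)
--     stack = [(state, path, get_next_states(state))]
--     while stack:
--         cur, cur_path, rem = stack[-1]
--         if not rem:
--             visited.discard(cur)
--             stack.pop()
--         else:
--             child = rem[0]
--             stack[-1] = (cur, cur_path, rem[1:])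
--             if child in visited:
--                 pass
--             elif child == goal_state:
--                 solutions.append(cur_path + [child])
--             else:
--                 visited.add(child)
--                 stack.append((child, cur_path + [child], get_next_states(child)))
--     return solutions
-- ===== Notes on version B (the rewrite author's own statement) =====
-- stated objective: alternative
-- what changed: The recursive DFS (call stack, recursion with add-on-entry/remove-on-exit on visited) is replaced by an iterative explicit-stack DFS: a while loop over frames (node, path, remaining children) that pushes a frame per unvisited non-goal child, appends a solution per goal child, and discards the node on pop, producing the identical solution preorder and identical visited-set mutations.
import Mathlib
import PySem

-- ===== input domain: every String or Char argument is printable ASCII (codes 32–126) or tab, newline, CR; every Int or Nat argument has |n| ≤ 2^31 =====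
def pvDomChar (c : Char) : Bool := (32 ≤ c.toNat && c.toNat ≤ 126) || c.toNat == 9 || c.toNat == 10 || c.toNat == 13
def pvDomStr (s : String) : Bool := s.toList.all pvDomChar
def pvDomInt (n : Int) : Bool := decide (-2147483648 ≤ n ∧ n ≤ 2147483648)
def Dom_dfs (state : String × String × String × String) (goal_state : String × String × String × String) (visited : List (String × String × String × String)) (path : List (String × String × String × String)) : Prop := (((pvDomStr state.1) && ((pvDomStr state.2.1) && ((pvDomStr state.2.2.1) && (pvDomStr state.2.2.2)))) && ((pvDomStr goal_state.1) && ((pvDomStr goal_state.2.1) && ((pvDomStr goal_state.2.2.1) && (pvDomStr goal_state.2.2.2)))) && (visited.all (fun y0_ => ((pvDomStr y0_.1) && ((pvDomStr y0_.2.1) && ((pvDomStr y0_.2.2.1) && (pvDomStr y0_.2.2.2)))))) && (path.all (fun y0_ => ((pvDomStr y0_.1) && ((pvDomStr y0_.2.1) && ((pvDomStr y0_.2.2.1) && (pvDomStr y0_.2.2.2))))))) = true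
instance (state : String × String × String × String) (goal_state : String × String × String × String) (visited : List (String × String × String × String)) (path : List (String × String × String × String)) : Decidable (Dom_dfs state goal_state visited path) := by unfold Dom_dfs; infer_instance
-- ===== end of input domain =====

-- B replaces A's recursive DFS by an iterative explicit-stack DFS (alternative decomposition, same
-- cost); both programs mutate the Python `visited` set with the identical add/remove sequence, and
-- the equivalence proved here is about the RETURN value.

-- ===== PORT A =====
-- A-side helpers: is_valid_state / get_next_states transliterated, plus the termination measure
-- for A's recursion (the recursion terminates because every reachable state has each component in
-- {original component, "e", "w"} — a finite universe — and `visited` grows along each chain).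
abbrev PvS : Type := String × String × String × String
def pvFlip (x : String) : String := if x == "e" then "w" else "e"
def pvValid (s : PvS) : Bool :=
  let (farmer, goat, wolf, cabbage) := s
  if farmer != goat && (goat == wolf || goat == cabbage) then false else true
def pvNext (s : PvS) : List PvS :=
  let (farmer, goat, wolf, cabbage) := s
  let ns := [(pvFlip farmer, goat, wolf, cabbage)]
  let ns := if farmer == goat then ns ++ [(pvFlip farmer, pvFlip goat, wolf, cabbage)] else ns
  let ns := if farmer == wolf then ns ++ [(pvFlip farmer, goat, pvFlip wolf, cabbage)] else ns
  let ns := if farmer == cabbage then ns ++ [(pvFlip farmer, goat, wolf, pvFlip cabbage)] else ns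
  ns.filter pvValid
def pvUniv (s : PvS) : List PvS :=
  [s.1, "e", "w"].flatMap fun a =>
    [s.2.1, "e", "w"].flatMap fun b =>
      [s.2.2.1, "e", "w"].flatMap fun c =>
        [s.2.2.2, "e", "w"].map fun d => (a, b, c, d)
lemma pvMem_univ_iff (s x : PvS) :
    x ∈ pvUniv s ↔ (x.1 = s.1 ∨ x.1 = "e" ∨ x.1 = "w") ∧ (x.2.1 = s.2.1 ∨ x.2.1 = "e" ∨ x.2.1 = "w")
      ∧ (x.2.2.1 = s.2.2.1 ∨ x.2.2.1 = "e" ∨ x.2.2.1 = "w") ∧ (x.2.2.2 = s.2.2.2 ∨ x.2.2.2 = "e" ∨ x.2.2.2 = "w") := by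
  rcases x with ⟨a, b, c, d⟩
  simp only [pvUniv, List.mem_flatMap, List.mem_map, List.mem_cons, List.not_mem_nil, or_false, Prod.mk.injEq]
  constructor
  · rintro ⟨a', ha, b', hb, c', hc, d', hd, rfl, rfl, rfl, rfl⟩
    exact ⟨ha, hb, hc, hd⟩
  · rintro ⟨ha, hb, hc, hd⟩
    exact ⟨a, ha, b, hb, c, hc, d, hd, rfl, rfl, rfl, rfl⟩
lemma pvMem_univ_self (s : PvS) : s ∈ pvUniv s := by
  rw [pvMem_univ_iff]; exact ⟨Or.inl rfl, Or.inl rfl, Or.inl rfl, Or.inl rfl⟩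
lemma pvTri {a b c : String} (h1 : a = b ∨ a = "e" ∨ a = "w")
    (h2 : b = c ∨ b = "e" ∨ b = "w") : a = c ∨ a = "e" ∨ a = "w" := by
  rcases h1 with rfl | h | h
  · exact h2
  · exact Or.inr (Or.inl h)
  · exact Or.inr (Or.inr h)
lemma pvUniv_subset {s x : PvS} (h : x ∈ pvUniv s) : pvUniv x ⊆ pvUniv s := by
  intro y hy
  rw [pvMem_univ_iff] at h hy ⊢
  exact ⟨pvTri hy.1 h.1, pvTri hy.2.1 h.2.1, pvTri hy.2.2.1 h.2.2.1, pvTri hy.2.2.2 h.2.2.2⟩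
lemma pvFlip_mem (x : String) : pvFlip x = "e" ∨ pvFlip x = "w" := by
  unfold pvFlip; split <;> simp
lemma pvNext_mem {s c : PvS} (h : c ∈ pvNext s) : c ∈ pvUniv s := by
  rcases s with ⟨f, g, w, cb⟩
  rw [pvMem_univ_iff]
  simp only [pvNext, List.mem_filter] at h
  obtain ⟨h, -⟩ := h
  have hf := pvFlip_mem f
  have hg := pvFlip_mem g
  have hw := pvFlip_mem w
  have hc := pvFlip_mem cb
  split_ifs at h <;>
    simp only [List.mem_append, List.mem_cons, List.not_mem_nil, or_false, or_assoc] at h <;>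
    (try rcases h with h | h | h | h) <;> simp_all

-- generic finite-set cardinality facts used by the termination measures
lemma pvFilter_add_erase (univ : Finset PvS) {w : List PvS} {c : PvS} (hcw : c ∉ w) :
    univ.filter (fun x => x ∉ PySem.Set.add w c) = (univ.filter (fun x => x ∉ w)).erase c := by
  have hadd : PySem.Set.add w c = w ++ [c] := PySem.Set.add_of_not_mem hcw
  ext y
  simp only [hadd, Finset.mem_filter, Finset.mem_erase, List.mem_append, List.mem_singleton, not_or]
  exact ⟨fun ⟨hu, hnv, hnc⟩ => ⟨hnc, hu, hnv⟩, fun ⟨hnc, hu, hnv⟩ => ⟨hu, hnv, hnc⟩⟩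
lemma pvCard_add_lt {univ : Finset PvS} {w : List PvS} {c : PvS} (hcu : c ∈ univ) (hcw : c ∉ w) :
    (univ.filter (fun x => x ∉ PySem.Set.add w c)).card < (univ.filter (fun x => x ∉ w)).card := by
  rw [pvFilter_add_erase univ hcw]
  exact Finset.card_erase_lt_of_mem (by simp [Finset.mem_filter, hcu, hcw])

def pvFree (s : PvS) (v : List PvS) : Nat :=
  ((pvUniv s).toFinset.filter (fun x => x ∉ v)).card
def pvMeasure (s : PvS) (v : List PvS) : Nat :=
  2 * pvFree s v + (if s ∈ v then 2 else 1)
lemma pvFree_mono {s x : PvS} (h : pvUniv x ⊆ pvUniv s) (v : List PvS) : pvFree x v ≤ pvFree s v := by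
  apply Finset.card_le_card
  apply Finset.filter_subset_filter
  intro y hy
  simp only [List.mem_toFinset] at *
  exact h hy
lemma pvMeasure_lt {s c : PvS} {v : List PvS} (hc : c ∈ pvNext s)
    (hnc : c ∉ PySem.Set.add v s) : pvMeasure c (PySem.Set.add v s) < pvMeasure s v := by
  have hcu : c ∈ pvUniv s := pvNext_mem hc
  have hsub : pvUniv c ⊆ pvUniv s := pvUniv_subset hcu
  by_cases hs : s ∈ v
  · have hadd : PySem.Set.add v s = v := PySem.Set.add_of_mem hs
    rw [hadd] at hnc ⊢
    have h1 : pvFree c v ≤ pvFree s v := pvFree_mono hsub v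
    simp only [pvMeasure, if_neg hnc, if_pos hs]
    omega
  · have h2 : pvFree s (PySem.Set.add v s) < pvFree s v :=
      pvCard_add_lt (by simp [List.mem_toFinset, pvMem_univ_self]) hs
    have h1 : pvFree c (PySem.Set.add v s) ≤ pvFree s (PySem.Set.add v s) :=
      pvFree_mono hsub _
    simp only [pvMeasure, if_neg hnc, if_neg hs]
    omega

def dfs (state : String × String × String × String) (goal_state : String × String × String × String) (visited : List (String × String × String × String)) (path : List (String × String × String × String)) : List (List (String × String × String × String)) :=
  if state == goal_state then [path]
  else
    let w := PySem.Set.add visited state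
    (pvNext state).attach.foldl
      (fun sols c =>
        if h : PySem.Set.contains w c.1 then sols
        else sols ++ dfs c.1 goal_state w (path ++ [c.1])) []
termination_by pvMeasure state visited
decreasing_by
  exact pvMeasure_lt c.2 (fun hm => h ((PySem.Set.contains_iff _ _).mpr hm))


-- ===== PORT B =====
-- B-side: one pvMachine step = one iteration of Source B's while loop over frames
-- (cur, cur_path, remaining children); fuel is only a totality guard (none = fuel exhausted),
-- proved below never to run out.
def pvMachine (g : PvS) : Nat → List (PvS × List PvS × List PvS) → List PvS →
    List (List PvS) → Option (List (List PvS))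
  | 0, _, _, _ => none
  | _ + 1, [], _, sols => some sols
  | fuel + 1, (cur, p, rem) :: rest, v, sols =>
    match rem with
    | [] => pvMachine g fuel rest (PySem.Set.discard v cur) sols
    | c :: rem' =>
      if PySem.Set.contains v c then pvMachine g fuel ((cur, p, rem') :: rest) v sols
      else if c == g then pvMachine g fuel ((cur, p, rem') :: rest) v (sols ++ [p ++ [c]])
      else pvMachine g fuel ((c, p ++ [c], pvNext c) :: (cur, p, rem') :: rest)
             (PySem.Set.add v c) sols

def pvFuel : Nat := 6 ^ 90

def dfs_alt (state : String × String × String × String) (goal_state : String × String × String × String) (visited : List (String × String × String × String)) (path : List (String × String × String × String)) : List (List (String × String × String × String)) :=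
  if state == goal_state then [path]
  else
    let w := PySem.Set.add visited state
    (pvMachine goal_state pvFuel [(state, path, pvNext state)] w []).getD []


-- ===== PRECONDITION & SPEC =====
-- (no Pre_: the Python A returns normally on every input)
def Spec_dfs (state : String × String × String × String) (goal_state : String × String × String × String) (visited : List (String × String × String × String)) (path : List (String × String × String × String)) (out : List (List (String × String × String × String))) : Prop := out = dfs_alt state goal_state visited path
instance (state : String × String × String × String) (goal_state : String × String × String × String) (visited : List (String × String × String × String)) (path : List (String × String × String × String)) (out : List (List (String × String × String × String))) : Decidable (Spec_dfs state goal_state visited path out) := by unfold Spec_dfs; infer_instance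

-- ===== CLAIM (what is proved, stated in full; the proofs are below) =====
def Claim_equal_dfs : Prop := ∀ (state : String × String × String × String) (goal_state : String × String × String × String) (visited : List (String × String × String × String)) (path : List (String × String × String × String)), Dom_dfs state goal_state visited path → Spec_dfs state goal_state visited path (dfs state goal_state visited path)

-- ===== LEMMAS AND PROOFS =====
-- pvCollect is A's harvest at one node; pvCost bounds the number of machine steps a frame costs;
-- pvSim is the simulation lemma: one machine frame computes exactly A's per-node fold.
def pvCollect (g : PvS) (w p : List PvS) : List PvS → List (List PvS)
  | [] => []
  | c :: r => (if PySem.Set.contains w c then [] else dfs c g w (p ++ [c])) ++ pvCollect g w p r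

def pvCost (g : PvS) (univ : Finset PvS) (w : List PvS) (rem : List PvS) : Nat :=
  match rem with
  | [] => 1
  | c :: r =>
    1 + (if hskip : PySem.Set.contains w c || c == g then 0
         else if hu : c ∈ univ then pvCost g univ (PySem.Set.add w c) (pvNext c) else 0)
      + pvCost g univ w r
termination_by ((univ.filter (fun x => x ∉ w)).card, rem.length)
decreasing_by
  · apply Prod.Lex.left
    apply pvCard_add_lt hu
    intro hm
    exact hskip (by simp; exact Or.inl hm)
  · apply Prod.Lex.right
    simp

lemma pvDiscard_add {w : List PvS} {c : PvS} (hc : c ∉ w) :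
    PySem.Set.discard (PySem.Set.add w c) c = w := by
  simp [PySem.Set.add_of_not_mem hc, PySem.Set.discard]
  exact fun a a1 a2 b hm he => hc (he ▸ hm)

lemma dfs_eq_goal {s g : PvS} (v p : List PvS) (h : s = g) : dfs s g v p = [p] := by
  rw [dfs]; simp [h]

lemma pvFoldl_collect (g : PvS) (w p : List PvS) (l : List PvS) :
    ∀ acc, l.foldl
        (fun sols c => if PySem.Set.contains w c then sols else sols ++ dfs c g w (p ++ [c])) acc
      = acc ++ pvCollect g w p l := by
  induction l with
  | nil => intro acc; simp [pvCollect]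
  | cons c r ih =>
    intro acc
    rw [List.foldl_cons, ih]
    by_cases hc : c ∈ w
    · simp [pvCollect, hc]
    · simp [pvCollect, hc, List.append_assoc]

lemma dfs_eq_collect {s g : PvS} (v p : List PvS) (h : ¬ s = g) :
    dfs s g v p = pvCollect g (PySem.Set.add v s) p (pvNext s) := by
  rw [dfs]
  simp only [beq_iff_eq, if_neg h, dite_eq_ite]
  rw [List.foldl_attach (f := fun sols c =>
    if PySem.Set.contains (PySem.Set.add v s) c then sols
    else sols ++ dfs c g (PySem.Set.add v s) (p ++ [c]))]
  rw [pvFoldl_collect]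
  simp

lemma pvSim (g : PvS) (univ : Finset PvS)
    (hcl : ∀ x ∈ univ, ∀ c ∈ pvNext x, c ∈ univ) :
    ∀ n (w : List PvS), (univ.filter (fun x => x ∉ w)).card ≤ n →
      ∀ (rem : List PvS), (∀ c ∈ rem, c ∈ univ) →
        ∀ (s : PvS) (p rest sols fuel),
          pvMachine g (fuel + pvCost g univ w rem) ((s, p, rem) :: rest) w sols
            = pvMachine g fuel rest (PySem.Set.discard w s) (sols ++ pvCollect g w p rem) := by
  intro n
  induction n using Nat.strong_induction_on with
  | _ n ih =>
    intro w hw rem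
    induction rem with
    | nil =>
      intro _ s p rest sols fuel
      simp [pvCost, pvCollect, pvMachine]
    | cons c r ihr =>
      intro hrem s p rest sols fuel
      have hcu : c ∈ univ := hrem c (by simp)
      have hrem' : ∀ x ∈ r, x ∈ univ := fun x hx => hrem x (by simp [hx])
      by_cases hcw : c ∈ w
      · have hcost : fuel + pvCost g univ w (c :: r) = (fuel + pvCost g univ w r) + 1 := by
          rw [pvCost]
          simp [hcw]
          omega
        rw [hcost, pvMachine]
        simp only [if_pos ((PySem.Set.contains_iff w c).mpr hcw)]
        rw [ihr hrem' s p rest sols fuel]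
        simp [pvCollect, hcw]
      · by_cases hcg : c = g
        · have hcost : fuel + pvCost g univ w (c :: r) = (fuel + pvCost g univ w r) + 1 := by
            rw [pvCost]
            simp [hcg]
            omega
          rw [hcost, pvMachine]
          simp only [if_neg (fun hm => hcw ((PySem.Set.contains_iff w c).mp hm)),
            if_pos (beq_iff_eq.mpr hcg)]
          rw [ihr hrem' s p rest (sols ++ [p ++ [c]]) fuel]
          rw [pvCollect, if_neg (fun hm => hcw ((PySem.Set.contains_iff w c).mp hm)),
            dfs_eq_goal _ _ hcg]
          simp
        · have hx : pvCost g univ w (c :: r)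
              = 1 + pvCost g univ (PySem.Set.add w c) (pvNext c) + pvCost g univ w r := by
            rw [pvCost]
            simp [hcw, hcg, hcu]
          have hcost : fuel + pvCost g univ w (c :: r)
              = ((fuel + pvCost g univ w r) + pvCost g univ (PySem.Set.add w c) (pvNext c)) + 1 := by
            rw [hx]; omega
          rw [hcost, pvMachine]
          simp only [if_neg (fun hm => hcw ((PySem.Set.contains_iff w c).mp hm)),
            if_neg (fun hb => hcg (beq_iff_eq.mp hb))]
          have hcard : ((univ.filter (fun x => x ∉ PySem.Set.add w c)).card) < n :=
            lt_of_lt_of_le (pvCard_add_lt hcu hcw) hw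
          rw [ih _ hcard (PySem.Set.add w c) le_rfl (pvNext c) (hcl c hcu) c (p ++ [c])
            ((s, p, r) :: rest) sols (fuel + pvCost g univ w r)]
          rw [pvDiscard_add hcw]
          rw [← dfs_eq_collect w (p ++ [c]) hcg]
          rw [ihr hrem' s p rest (sols ++ dfs c g w (p ++ [c])) fuel]
          rw [pvCollect, if_neg (fun hm => hcw ((PySem.Set.contains_iff w c).mp hm))]
          simp

lemma pvNext_len (s : PvS) : (pvNext s).length ≤ 4 := by
  rcases s with ⟨f, g, w, cb⟩
  simp only [pvNext]
  split_ifs <;> exact le_trans (List.length_filter_le _ _) (by simp)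

lemma pvUniv_len (s : PvS) : (pvUniv s).length = 81 := by
  rcases s with ⟨a, b, c, d⟩
  rfl

lemma pvCost_le (g : PvS) (univ : Finset PvS)
    (hcl : ∀ x ∈ univ, ∀ c ∈ pvNext x, c ∈ univ) :
    ∀ n (w : List PvS), (univ.filter (fun x => x ∉ w)).card ≤ n →
      ∀ rem, (∀ c ∈ rem, c ∈ univ) → pvCost g univ w rem ≤ (rem.length + 1) * 6 ^ (n + 1) := by
  intro n
  induction n using Nat.strong_induction_on with
  | _ n ih =>
    intro w hw rem
    induction rem with
    | nil =>
      intro _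
      rw [pvCost]
      simpa using Nat.one_le_pow (n + 1) 6 (by norm_num)
    | cons c r ihr =>
      intro hrem
      have hcu : c ∈ univ := hrem c (by simp)
      have hrem' : ∀ x ∈ r, x ∈ univ := fun x hx => hrem x (by simp [hx])
      have hr := ihr hrem'
      have hK : 1 ≤ 6 ^ n := Nat.one_le_pow n 6 (by norm_num)
      rw [pvCost]
      by_cases hcw : c ∈ w
      · rw [dif_pos (by simp [hcw])]
        have h1 : (r.length + 1 + 1) * 6 ^ (n + 1) = (r.length + 1) * 6 ^ (n + 1) + 6 ^ (n + 1) := by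
          ring
        have h2 : 6 ^ (n + 1) = 6 * 6 ^ n := by ring
        simp only [List.length_cons]
        linarith [hr]
      · by_cases hcg : c = g
        · rw [dif_pos (by simp [hcg])]
          have h1 : (r.length + 1 + 1) * 6 ^ (n + 1) = (r.length + 1) * 6 ^ (n + 1) + 6 ^ (n + 1) := by
            ring
          have h2 : 6 ^ (n + 1) = 6 * 6 ^ n := by ring
          simp only [List.length_cons]
          linarith [hr]
        · rw [dif_neg (by simp [hcw, hcg]), dif_pos hcu]
          have hn1 : 1 ≤ n := by
            have hpos : 0 < (univ.filter (fun x => x ∉ w)).card :=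
              Finset.card_pos.mpr ⟨c, by simp [Finset.mem_filter, hcu, hcw]⟩
            omega
          have hcard : (univ.filter (fun x => x ∉ PySem.Set.add w c)).card ≤ n - 1 := by
            have := pvCard_add_lt hcu hcw
            omega
          have hinner := ih (n - 1) (by omega) (PySem.Set.add w c) hcard (pvNext c) (hcl c hcu)
          rw [show n - 1 + 1 = n from by omega] at hinner
          have hlen : (pvNext c).length + 1 ≤ 5 := by
            have := pvNext_len c
            omega
          have hinner5 : pvCost g univ (PySem.Set.add w c) (pvNext c) ≤ 5 * 6 ^ n :=
            le_trans hinner (Nat.mul_le_mul_right _ hlen)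
          have h1 : (r.length + 1 + 1) * 6 ^ (n + 1) = (r.length + 1) * 6 ^ (n + 1) + 6 * 6 ^ n := by
            ring
          simp only [List.length_cons]
          linarith [hr]

lemma pvMain (s g : PvS) (v p : List PvS) : dfs s g v p = dfs_alt s g v p := by
  by_cases h : s = g
  · rw [dfs_eq_goal v p h]
    simp [dfs_alt, h]
  · have halt : dfs_alt s g v p
        = (pvMachine g pvFuel [(s, p, pvNext s)] (PySem.Set.add v s) []).getD [] := by
      simp [dfs_alt, h]
    set univ := (pvUniv s).toFinset with huniv
    have hcl : ∀ x ∈ univ, ∀ c ∈ pvNext x, c ∈ univ := by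
      intro x hx c hc
      simp only [huniv, List.mem_toFinset] at hx ⊢
      exact pvUniv_subset hx (pvNext_mem hc)
    have hrem : ∀ c ∈ pvNext s, c ∈ univ := by
      intro c hc
      simp only [huniv, List.mem_toFinset]
      exact pvNext_mem hc
    set w := PySem.Set.add v s with hwdef
    have hcard : (univ.filter (fun x => x ∉ w)).card ≤ 81 := by
      calc (univ.filter (fun x => x ∉ w)).card ≤ univ.card := Finset.card_filter_le _ _
        _ ≤ (pvUniv s).length := List.toFinset_card_le _
        _ = 81 := pvUniv_len s
    set C := pvCost g univ w (pvNext s) with hC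
    have hCle : C ≤ 5 * 6 ^ 82 := by
      have h1 := pvCost_le g univ hcl 81 w hcard (pvNext s) hrem
      have h2 : (pvNext s).length + 1 ≤ 5 := by
        have := pvNext_len s
        omega
      calc C ≤ ((pvNext s).length + 1) * 6 ^ 82 := h1
        _ ≤ 5 * 6 ^ 82 := Nat.mul_le_mul_right _ h2
    have hfuel : C + 1 ≤ pvFuel := by
      have h83 : 5 * 6 ^ 82 + 1 ≤ 6 ^ 83 := by
        have : (6 : Nat) ^ 83 = 6 * 6 ^ 82 := by ring
        have h1 : 1 ≤ (6 : Nat) ^ 82 := Nat.one_le_pow _ _ (by norm_num)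
        linarith
      have h90 : (6 : Nat) ^ 83 ≤ 6 ^ 90 := Nat.pow_le_pow_right (by norm_num) (by norm_num)
      unfold pvFuel
      omega
    have hsplit : pvFuel = ((pvFuel - C - 1) + 1) + C := by omega
    have hM : pvMachine g pvFuel [(s, p, pvNext s)] w [] = some (pvCollect g w p (pvNext s)) := by
      rw [hsplit, pvSim g univ hcl 81 w hcard (pvNext s) hrem s p [] [] _, pvMachine]
      simp
    rw [halt, hM]
    simp only [Option.getD_some]
    exact dfs_eq_collect v p h

-- ===== VERDICT (by name: the statement is the Claim_ definition above) =====
theorem dfs_spec : Claim_equal_dfs := by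
  intro state goal_state visited path _
  unfold Spec_dfs
  exact pvMain state goal_state visited path
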